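-- pv_equiv track=rewrite | github.com/Alucad0/AdventOfCode | 2025/day3.py | part_one
-- ===== SOURCE A (Python) =====
-- def part_one(power, joltage):
--     for electricity in joltage:
--         val = 0
--         digit = 0
--         for index in range(len(electricity)):
--
--             if int(electricity[index]) > val and index != len(electricity) - 1:
--                 val = int(electricity[index])
--                 digit = 0  # reset digit when a new val is found
--
--             elif int(electricity[index]) > digit:
--                 digit = int(electricity[index])
--
--         power += val*10 + digit
--     return power
-- ===== SOURCE B (Python) =====
-- def part_one(power, joltage):
--     for electricity in joltage:
--         digits = [int(c) for c in electricity]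
--         if not digits:
--             continue
--         if len(digits) == 1:
--             power += digits[0]
--             continue
--         init = digits[:-1]
--         val = max(init)
--         p = init.index(val)
--         digit = max(digits[p + 1:])
--         power += val * 10 + digit
--     return power
-- ===== Notes on version B (the rewrite author's own statement) =====
-- stated objective: simpler
-- what changed: Replaces A's intertwined running-max-with-digit-reset loop by an explicit decomposition: max over all-but-last digits, first index of that max, then max over the suffix after it.
import Mathlib
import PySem

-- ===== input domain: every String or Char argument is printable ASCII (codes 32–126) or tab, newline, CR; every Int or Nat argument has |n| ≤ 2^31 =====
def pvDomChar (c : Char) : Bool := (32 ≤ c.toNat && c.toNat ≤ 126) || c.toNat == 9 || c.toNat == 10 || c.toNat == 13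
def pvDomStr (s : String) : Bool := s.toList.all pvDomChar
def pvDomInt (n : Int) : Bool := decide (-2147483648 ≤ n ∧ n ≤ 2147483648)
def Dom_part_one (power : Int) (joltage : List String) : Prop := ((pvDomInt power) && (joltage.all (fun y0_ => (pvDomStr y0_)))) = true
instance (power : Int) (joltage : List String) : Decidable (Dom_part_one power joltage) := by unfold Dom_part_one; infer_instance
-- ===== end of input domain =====

-- B replaces A's intertwined running-max-with-reset loop by an explicit max / first-index / suffix-max
-- decomposition per string (objective: simpler; same cost).


-- ===== PORT A =====
-- int(c) for a single character: exact on digit characters '0'..'9'; Pre_ excludes every other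
-- character (Python's int() raises ValueError there).
def pvCharInt (c : Char) : Int := (c.toNat : Int) - 48

def part_one (power : Int) (joltage : List String) : Int :=
  joltage.foldl (fun power electricity =>
    let cs := electricity.toList
    let st := (PySem.List.pyRange 0 (cs.length : Int) 1).foldl
      (fun (s : Int × Int) index =>
        let d := pvCharInt (PySem.List.pyGetD cs index ' ')
        if d > s.1 ∧ index ≠ (cs.length : Int) - 1 then (d, 0)
        else if d > s.2 then (s.1, d) else s) (0, 0)
    power + (st.1 * 10 + st.2)) power

-- ===== PORT B =====
def part_one_alt (power : Int) (joltage : List String) : Int :=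
  joltage.foldl (fun power electricity =>
    let digits := electricity.toList.map pvCharInt
    match digits with
    | [] => power
    | [d] => power + d
    | _ =>
      let init := PySem.List.slice digits none (some (-1))
      let val := (PySem.List.max? init (fun x => x)).getD 0
      let p := (PySem.List.index? init val).getD 0
      let digit := (PySem.List.max? (PySem.List.slice digits (some ((p : Int) + 1)) none) (fun x => x)).getD 0
      power + (val * 10 + digit)) power

-- ===== PRECONDITION & SPEC =====
-- Pre_ excludes exactly the inputs holding a non-digit character, on which both Pythons raise ValueError.
def Pre_part_one (power : Int) (joltage : List String) : Prop :=
  (joltage.all (fun s => s.toList.all (fun c => 48 ≤ c.toNat && c.toNat ≤ 57))) = true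
instance (power : Int) (joltage : List String) : Decidable (Pre_part_one power joltage) := by unfold Pre_part_one; infer_instance
def pvWitness_part_one : Int × List String := (7, ["3517", "90", "4"])

def Spec_part_one (power : Int) (joltage : List String) (out : Int) : Prop := out = part_one_alt power joltage
instance (power : Int) (joltage : List String) (out : Int) : Decidable (Spec_part_one power joltage out) := by unfold Spec_part_one; infer_instance

-- ===== CLAIM (what is proved, stated in full; the proofs are below) =====
def Claim_equal_part_one : Prop := ∀ (power : Int) (joltage : List String), Dom_part_one power joltage → Pre_part_one power joltage → Spec_part_one power joltage (part_one power joltage)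

-- ===== LEMMAS AND PROOFS =====

-- A's inner-loop step on all-but-last positions (the 'index != len-1' branch is reachable).
def pvStep (s : Int × Int) (d : Int) : Int × Int :=
  if d > s.1 then (d, 0) else if d > s.2 then (s.1, d) else s

-- The two loop bodies, named so the per-string lemma has clean goals (each is defeq to its port's lambda).
def pvBodyA (power : Int) (cs : List Char) : Int :=
  let st := (PySem.List.pyRange 0 (cs.length : Int) 1).foldl
    (fun (s : Int × Int) index =>
      let d := pvCharInt (PySem.List.pyGetD cs index ' ')
      if d > s.1 ∧ index ≠ (cs.length : Int) - 1 then (d, 0)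
      else if d > s.2 then (s.1, d) else s) (0, 0)
  power + (st.1 * 10 + st.2)

def pvBodyB (power : Int) (digits : List Int) : Int :=
  match digits with
  | [] => power
  | [d] => power + d
  | _ =>
    let init := PySem.List.slice digits none (some (-1))
    let val := (PySem.List.max? init (fun x => x)).getD 0
    let p := (PySem.List.index? init val).getD 0
    let digit := (PySem.List.max? (PySem.List.slice digits (some ((p : Int) + 1)) none) (fun x => x)).getD 0
    power + (val * 10 + digit)

-- The wildcard arm of pvBodyB on an explicit two-or-more-element list.
lemma pvBodyB_cons2 (power d0 d1 : Int) (t1 : List Int) :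
    pvBodyB power (d0 :: d1 :: t1) =
      power + (((PySem.List.max? (PySem.List.slice (d0 :: d1 :: t1) none (some (-1))) (fun x => x)).getD 0) * 10 +
        ((PySem.List.max? (PySem.List.slice (d0 :: d1 :: t1)
          (some ((((PySem.List.index? (PySem.List.slice (d0 :: d1 :: t1) none (some (-1)))
            ((PySem.List.max? (PySem.List.slice (d0 :: d1 :: t1) none (some (-1))) (fun x => x)).getD 0)).getD 0 : Nat) : Int) + 1)) none) (fun x => x)).getD 0)) := rfl

-- Characterisation of A's running pass over a nonempty list of nonneg digits:
-- the first component is the max, the list splits at the FIRST occurrence of the max,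
-- and the second component is the max of the suffix after it.
lemma pvLoop (l : List Int) (h : ∀ x ∈ l, 0 ≤ x) (hl : l ≠ []) :
    ∃ pre suf, l = pre ++ (l.foldl max 0) :: suf ∧ (l.foldl max 0) ∉ pre ∧
      l.foldl pvStep (0, 0) = (l.foldl max 0, suf.foldl max 0) := by
  induction l using List.reverseRecOn with
  | nil => exact absurd rfl hl
  | append_singleton l d ih =>
    have hd : 0 ≤ d := h d (by simp)
    have hmem : ∀ x ∈ l, 0 ≤ x := fun x hx => h x (by simp [hx])
    rcases eq_or_ne l [] with rfl | hne
    · refine ⟨[], [], ?_, by simp, ?_⟩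
      · simp [max_eq_right hd]
      · simp only [List.nil_append, List.foldl_cons, List.foldl_nil, pvStep]
        rcases lt_or_eq_of_le hd with h1 | h1
        · simp [max_eq_right hd, h1]
        · simp [← h1]
    · obtain ⟨pre, suf, hsplit, hnotin, hfold⟩ := ih hmem hne
      have hMl := (PySem.List.le_foldl_max l 0).2
      by_cases hgt : d > l.foldl max 0
      · have hM : (l ++ [d]).foldl max 0 = d := by
          simp [List.foldl_append, max_eq_right (le_of_lt hgt)]
        refine ⟨l, [], ?_, ?_, ?_⟩
        · rw [hM]
        · rw [hM]; intro hmemd; exact absurd (hMl d hmemd) (not_le.mpr hgt)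
        · rw [hM, List.foldl_append, hfold]
          simp only [List.foldl_cons, List.foldl_nil, pvStep]
          rw [if_pos hgt]
      · have hle : d ≤ l.foldl max 0 := not_lt.mp hgt
        have hM : (l ++ [d]).foldl max 0 = l.foldl max 0 := by
          simp [List.foldl_append, max_eq_left hle]
        refine ⟨pre, suf ++ [d], ?_, ?_, ?_⟩
        · rw [hM]
          conv_lhs => rw [hsplit]
          simp
        · rw [hM]; exact hnotin
        · rw [hM, List.foldl_append, hfold]
          simp only [List.foldl_cons, List.foldl_nil, pvStep, List.foldl_append]
          rw [if_neg (by omega : ¬ d > l.foldl max 0)]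
          by_cases h2 : d > suf.foldl max 0
          · rw [if_pos h2]; simp [max_eq_right (le_of_lt h2)]
          · rw [if_neg h2]; simp [max_eq_left (not_lt.mp h2)]

-- foldl max with a nonneg head absorbs the 0 seed.
lemma pvFoldlMaxHead (x : Int) (t : List Int) (hx : 0 ≤ x) :
    (x :: t).foldl max 0 = t.foldl max x := by
  simp [List.foldl_cons, max_eq_right hx]

-- Per-string equality of the two loop bodies, under Pre_'s digit condition.
lemma pvBody (power : Int) (cs : List Char)
    (hs : cs.all (fun c => 48 ≤ c.toNat && c.toNat ≤ 57) = true) :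
    pvBodyA power cs = pvBodyB power (cs.map pvCharInt) := by
  have hnn : ∀ c ∈ cs, 0 ≤ pvCharInt c := by
    intro c hc
    have := List.all_eq_true.mp hs c hc
    simp only [Bool.and_eq_true, decide_eq_true_eq] at this
    simp only [pvCharInt]; omega
  rcases List.eq_nil_or_concat cs with hnil | ⟨body, last, hsplit⟩
  · -- empty string
    subst hnil
    simp [pvBodyA, pvBodyB, PySem.List.pyRange_one_eq_nil]
  · -- cs = body ++ [last]
    rw [List.concat_eq_append] at hsplit
    subst hsplit
    set cs := body ++ [last] with hsplit
    have hlen : (cs.length : Int) = (body.length : Int) + 1 := by simp [hsplit]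
    have hrange : PySem.List.pyRange 0 (cs.length : Int) 1 =
        PySem.List.pyRange 0 (body.length : Int) 1 ++ [(body.length : Int)] := by
      rw [hlen, PySem.List.pyRange_one_succ_right (by positivity)]
    -- the prefix part of A's loop is pvStep over body's digits
    have hpref : ∀ init : Int × Int,
        (PySem.List.pyRange 0 (body.length : Int) 1).foldl
          (fun (s : Int × Int) index =>
            let d := pvCharInt (PySem.List.pyGetD cs index ' ')
            if d > s.1 ∧ index ≠ (cs.length : Int) - 1 then (d, 0)
            else if d > s.2 then (s.1, d) else s) init =
        (body.map pvCharInt).foldl pvStep init := by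
      intro init
      have h1 : (PySem.List.pyRange 0 (body.length : Int) 1).foldl
          (fun (s : Int × Int) index =>
            let d := pvCharInt (PySem.List.pyGetD cs index ' ')
            if d > s.1 ∧ index ≠ (cs.length : Int) - 1 then (d, 0)
            else if d > s.2 then (s.1, d) else s) init =
          (PySem.List.pyRange 0 (body.length : Int) 1).foldl
          (fun (s : Int × Int) index => pvStep s (pvCharInt (PySem.List.pyGetD body index ' '))) init := by
        apply PySem.List.foldl_congr_mem
        intro acc x hx
        have hx' := (PySem.List.mem_pyRange_one).mp hx
        have hxlt : x < (body.length : Int) := hx'.2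
        have hxe : PySem.List.pyGetD cs x ' ' = PySem.List.pyGetD body x ' ' := by
          rw [PySem.List.pyGetD_eq_getElem cs ' ' hx'.1 (by omega),
              PySem.List.pyGetD_eq_getElem body ' ' hx'.1 (by omega)]
          exact List.getElem_append_left (by omega)
        have hne : x ≠ (cs.length : Int) - 1 := by omega
        simp only [hxe, hne, ne_eq, not_false_eq_true, and_true, pvStep]
      rw [h1]
      have h2 := PySem.List.foldl_pyRange_zero_pyGetD body ' '
        (fun (s : Int × Int) c => pvStep s (pvCharInt c)) init
      simp only [PySem.List.len] at h2
      rw [h2, List.foldl_map]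
    set ds := body.map pvCharInt with hds
    have hdnn : ∀ x ∈ ds, 0 ≤ x := by
      intro x hx
      obtain ⟨c, hc, rfl⟩ := List.mem_map.mp hx
      exact hnn c (by rw [hsplit]; simp [hc])
    have hlastmem : last ∈ cs := by rw [hsplit]; simp
    have hlnn : 0 ≤ pvCharInt last := hnn last hlastmem
    have hgetlast : PySem.List.pyGetD cs (body.length : Int) ' ' = last := by
      rw [PySem.List.pyGetD_eq_getElem cs ' ' (by positivity) (by omega)]
      exact (by simp : (body ++ [last])[(body.length : Int).toNat]'(by simp) = last)
    have hmap : cs.map pvCharInt = ds ++ [pvCharInt last] := by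
      rw [hsplit]; simp [hds]
    have hlast_ne : ¬ ((body.length : Int) ≠ (cs.length : Int) - 1) := by simp [hlen]
    rcases eq_or_ne ds [] with hdnil | hdne
    · -- single-character string
      have hbody : body = [] := by
        cases body with
        | nil => rfl
        | cons a t => simp [hds] at hdnil
      subst hbody
      rw [pvBodyA]
      simp only [hrange, List.foldl_append, List.foldl_nil, List.foldl_cons,
        List.length_nil, Nat.cast_zero]
      rw [hmap]
      simp only [hdnil, List.nil_append, pvBodyB]
      have hget0 : PySem.List.pyGetD cs 0 ' ' = last := by simpa using hgetlast
      have hc1 : (cs.length : Int) - 1 = 0 := by simp [hsplit]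
      by_cases h2 : pvCharInt last > 0
      · simp [hget0, hc1, h2]
      · have h0 : pvCharInt last = 0 := le_antisymm (not_lt.mp h2) hlnn
        simp [hget0, hc1, h0]
    · -- at least two characters
      obtain ⟨pre, suf, hsp, hnotin, hfold⟩ := pvLoop ds hdnn hdne
      have hA : pvBodyA power cs =
          power + ((ds.foldl max 0) * 10 + max (suf.foldl max 0) (pvCharInt last)) := by
        rw [pvBodyA]
        simp only [hrange, List.foldl_append]
        rw [hpref, hfold]
        simp only [List.foldl_cons, List.foldl_nil, hgetlast, hlast_ne, and_false, if_false]
        by_cases h2 : pvCharInt last > suf.foldl max 0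
        · simp [h2, max_eq_right (le_of_lt h2)]
        · simp [h2, max_eq_left (not_lt.mp h2)]
      rw [hA]
      -- B's side: the match is on a list of length ≥ 2
      obtain ⟨d0, t0, ht0⟩ := List.exists_cons_of_ne_nil hdne
      have hmap2 : cs.map pvCharInt = d0 :: (t0 ++ [pvCharInt last]) := by
        rw [hmap, ht0]; simp
      obtain ⟨d1, t1, ht1⟩ := List.exists_cons_of_ne_nil
        (by simp : t0 ++ [pvCharInt last] ≠ ([] : List Int))
      have hcons : cs.map pvCharInt = d0 :: d1 :: t1 := by rw [hmap2, ht1]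
      rw [hcons, pvBodyB_cons2]
      have hback : d0 :: d1 :: t1 = ds ++ [pvCharInt last] := by rw [← hcons, hmap]
      have hslice1 : PySem.List.slice (d0 :: d1 :: t1) none (some (-1)) = ds := by
        rw [PySem.List.slice_to_neg_one, hback, List.dropLast_concat]
      rw [hslice1]
      have hM : (PySem.List.max? ds (fun x => x)).getD 0 = ds.foldl max 0 := by
        rw [ht0, PySem.List.max?_id_cons]
        have h0 : 0 ≤ d0 := hdnn d0 (by rw [ht0]; simp)
        rw [Option.getD_some, ← pvFoldlMaxHead d0 t0 h0]
      rw [hM]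
      have hp : (PySem.List.index? ds (ds.foldl max 0)).getD 0 = pre.length := by
        rw [(PySem.List.index?_eq_some_iff ds (ds.foldl max 0) pre.length).mpr
          ⟨pre, suf, hsp, rfl, hnotin⟩]
        rfl
      rw [hp]
      have hslice2 : PySem.List.slice (d0 :: d1 :: t1) (some ((pre.length : Int) + 1)) none =
          suf ++ [pvCharInt last] := by
        have hcast : ((pre.length : Int) + 1) = ((pre.length + 1 : Nat) : Int) := by push_cast; ring
        have hlist2 : d0 :: d1 :: t1 = (pre ++ [ds.foldl max 0]) ++ (suf ++ [pvCharInt last]) := by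
          rw [hback]
          conv_lhs => rw [hsp]
          simp
        rw [hcast, PySem.List.slice_from_natCast, hlist2]
        rw [show pre.length + 1 = (pre ++ [ds.foldl max 0]).length by simp]
        exact List.drop_left
      rw [hslice2]
      have hS : (PySem.List.max? (suf ++ [pvCharInt last]) (fun x => x)).getD 0 =
          max (suf.foldl max 0) (pvCharInt last) := by
        obtain ⟨e0, e1, he⟩ := List.exists_cons_of_ne_nil
          (by simp : suf ++ [pvCharInt last] ≠ ([] : List Int))
        have h0 : 0 ≤ e0 := by
          have : e0 ∈ suf ++ [pvCharInt last] := by rw [he]; simp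
          rcases List.mem_append.mp this with h1 | h1
          · exact hdnn e0 (by rw [hsp]; simp [h1])
          · simp at h1; omega
        rw [he, PySem.List.max?_id_cons, Option.getD_some, ← pvFoldlMaxHead e0 e1 h0, ← he]
        simp [List.foldl_append]
      rw [hS]

-- ===== VERDICT (by name: the statement is the Claim_ definition above) =====
theorem part_one_spec : Claim_equal_part_one := by
  intro power joltage _hdom hpre
  unfold Spec_part_one part_one part_one_alt
  apply PySem.List.foldl_congr_mem
  intro acc s hs
  have hs' : s.toList.all (fun c => 48 ≤ c.toNat && c.toNat ≤ 57) = true :=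
    List.all_eq_true.mp hpre s hs
  exact pvBody acc s.toList hs'
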